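-- pv_equiv track=rewrite | github.com/2003and/glubinnaya-avtomatizaciya | tasks/06.09.23 - two-side squares.py | generate_array_of_squares
-- ===== SOURCE A (Python) =====
-- def generate_array_of_squares(N):
--     res: list = []
--     for i in range(N,0,-1):
--         res.append(-1*i**2)
--     res.append(0)
--     for i in range(1,N+1):
--         res.append(i**2)
--     return res
-- ===== SOURCE B (Python) =====
-- def generate_array_of_squares(N):
--     M = max(N, 0)
--     return [i * abs(i) for i in range(-M, M + 1)]
-- ===== Notes on version B (the rewrite author's own statement) =====
-- stated objective: simpler
-- what changed: Replaces A's two sequential loops plus the middle append with a single symmetric list comprehension over range(-M, M+1) emitting i*abs(i), where M = max(N, 0) keeps the [0] result for non-positive N.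
import Mathlib
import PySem

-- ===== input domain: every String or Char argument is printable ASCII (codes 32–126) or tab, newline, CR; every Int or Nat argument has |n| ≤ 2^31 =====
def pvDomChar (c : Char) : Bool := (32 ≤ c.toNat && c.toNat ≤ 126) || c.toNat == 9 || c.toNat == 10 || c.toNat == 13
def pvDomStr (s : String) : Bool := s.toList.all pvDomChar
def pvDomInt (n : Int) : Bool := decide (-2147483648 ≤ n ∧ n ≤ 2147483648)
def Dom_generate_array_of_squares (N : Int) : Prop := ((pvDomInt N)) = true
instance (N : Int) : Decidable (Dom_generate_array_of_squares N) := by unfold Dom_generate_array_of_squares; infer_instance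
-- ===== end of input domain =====

-- B replaces A's two sequential loops plus the middle append by one symmetric
-- comprehension over range(-M, M+1) emitting i*abs(i), M = max(N,0): simpler, same cost.

-- ===== PORT A =====
def generate_array_of_squares (N : Int) : List Int :=
  let res : List Int := []
  let res := (PySem.List.pyRange N 0 (-1)).foldl (fun r i => r ++ [(-1) * i ^ 2]) res
  let res := res ++ [0]
  let res := (PySem.List.pyRange 1 (N + 1) 1).foldl (fun r i => r ++ [i ^ 2]) res
  res

-- ===== PORT B =====
def generate_array_of_squares_alt (N : Int) : List Int :=
  let M := max N 0
  (PySem.List.pyRange (-M) (M + 1) 1).map (fun i => i * |i|)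

-- ===== PRECONDITION & SPEC =====
def Spec_generate_array_of_squares (N : Int) (out : List Int) : Prop := out = generate_array_of_squares_alt N
instance (N : Int) (out : List Int) : Decidable (Spec_generate_array_of_squares N out) := by unfold Spec_generate_array_of_squares; infer_instance

-- ===== CLAIM (what is proved, stated in full; the proofs are below) =====
def Claim_equal_generate_array_of_squares : Prop := ∀ (N : Int), Dom_generate_array_of_squares N → Spec_generate_array_of_squares N (generate_array_of_squares N)

-- ===== LEMMAS AND PROOFS =====

theorem pv_foldl_append_map {α β : Type} (l : List α) (f : α → β) (init : List β) :
    l.foldl (fun r i => r ++ [f i]) init = init ++ l.map f := by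
  induction l generalizing init with
  | nil => simp
  | cons a t ih => simp [List.foldl, ih]

theorem generate_array_of_squares_spec' (N : Int) :
    generate_array_of_squares N = generate_array_of_squares_alt N := by
  unfold generate_array_of_squares generate_array_of_squares_alt
  simp only [pv_foldl_append_map, List.nil_append]
  by_cases h : N ≤ 0
  · rw [max_eq_right h]
    have h01 : PySem.List.pyRange (-(0:Int)) ((0:Int) + 1) 1 = [0] := by decide
    rw [PySem.List.pyRange_neg_one_eq_nil h,
        PySem.List.pyRange_one_eq_nil (by omega : N + 1 ≤ 1), h01]
    simp
  · have h' : 0 < N := by omega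
    have h01 : PySem.List.pyRange 0 1 1 = [0] := by decide
    rw [max_eq_left (by omega : 0 ≤ N)]
    rw [PySem.List.pyRange_one_append (-N) 1 (N + 1) (by omega) (by omega),
        PySem.List.pyRange_one_append (-N) 0 1 (by omega) (by omega), h01]
    rw [PySem.List.pyRange_neg_one N 0, PySem.List.pyRange_one (-N) 0]
    simp only [List.map_append, List.map_map, List.map_cons, List.map_nil, List.append_assoc]
    congr 1
    · have : (N - 0).toNat = (0 - -N).toNat := by omega
      rw [this]
      apply List.map_congr_left
      intro k hk
      rw [List.mem_range] at hk
      have hk' : (k : Int) < N := by omega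
      simp only [Function.comp_apply]
      have habs : |(-N + (k : Int))| = N - k := by
        rw [abs_of_nonpos (by omega)]; ring
      rw [habs]; ring
    · congr 1
      apply List.map_congr_left
      intro a ha
      rw [PySem.List.mem_pyRange_one] at ha
      rw [abs_of_pos (by omega)]; ring

-- ===== VERDICT (by name: the statement is the Claim_ definition above) =====
theorem generate_array_of_squares_spec : Claim_equal_generate_array_of_squares := by
  intro N _
  exact generate_array_of_squares_spec' N
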